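-- pv_equiv track=rewrite | github.com/jaydeelew/leet_python311 | AssortedProblems/0_MaxSumUCG.py | maxSum3
-- ===== SOURCE A (Python) =====
-- def maxSum3(adj_list, start_node):
--     # Convert node names to indices for bit manipulation
--     nodes = list(adj_list.keys())
--     node_to_idx = {node: i for i, node in enumerate(nodes)}
--
--     # Create DP table: (current_node, visited_mask) -> max_sum
--     dp = {}
--
--     def solve(curr_node, visited):
--         # If we've seen this state before, return cached result
--         state = (curr_node, visited)
--         if state in dp:
--             return dp[state]
--
--         max_sum = 0
--
--         # Try visiting each unvisited neighbor
--         for neighbor, dist in adj_list[curr_node].items():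
--             neighbor_idx = node_to_idx[neighbor]
--             if not (visited & (1 << neighbor_idx)):  # if neighbor not visited
--                 # Mark neighbor as visited using bitmask
--                 new_visited = visited | (1 << neighbor_idx)
--                 new_sum = dist + solve(neighbor, new_visited)
--                 max_sum = max(max_sum, new_sum)
--
--         dp[state] = max_sum
--         return max_sum
--
--     # Start with only start_node visited
--     initial_visited = 1 << node_to_idx[start_node]
--     return solve(start_node, initial_visited)
-- ===== SOURCE B (Python) =====
-- def maxSum3(adj_list, start_node):
--     # Bottom-up DP over (node, visited_mask) states: first collect the states
--     # reachable from the start state, then fill a value table in decreasing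
--     # popcount order (children before parents) and read off the start state.
--     nodes = list(adj_list)
--     idx = {node: i for i, node in enumerate(nodes)}
--
--     def successors(state):
--         cur, mask = state
--         return [(nbr, mask | (1 << idx[nbr]))
--                 for nbr, _ in adj_list[cur].items()
--                 if not mask & (1 << idx[nbr])]
--
--     start = (start_node, 1 << idx[start_node])
--     states = {start}
--     for _ in nodes:  # popcount grows each step, so len(nodes) rounds reach a fixpoint
--         states |= {s for st in states for s in successors(st)}
--
--     value = {}
--     for state in sorted(states, key=lambda s: bin(s[1]).count("1"), reverse=True):
--         cur, mask = state
--         value[state] = max([0] + [dist + value[(nbr, mask | (1 << idx[nbr]))]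
--                                   for nbr, dist in adj_list[cur].items()
--                                   if not mask & (1 << idx[nbr])])
--     return value[start]
-- ===== Notes on version B (the rewrite author's own statement) =====
-- stated objective: alternative
-- what changed: Replaces the memoized top-down recursion over (node, bitmask) states by an explicit bottom-up dynamic program: collect the states reachable from the start state by iterated successor expansion, sort them by decreasing popcount so children are filled before parents, fill a value table iteratively, and read off the start state.
-- outside the precondition, e.g. on maxSum3({'a': {}, 'b': {'z': 1}}, 'a'): A returns 0, B returns 0
import Mathlib
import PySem

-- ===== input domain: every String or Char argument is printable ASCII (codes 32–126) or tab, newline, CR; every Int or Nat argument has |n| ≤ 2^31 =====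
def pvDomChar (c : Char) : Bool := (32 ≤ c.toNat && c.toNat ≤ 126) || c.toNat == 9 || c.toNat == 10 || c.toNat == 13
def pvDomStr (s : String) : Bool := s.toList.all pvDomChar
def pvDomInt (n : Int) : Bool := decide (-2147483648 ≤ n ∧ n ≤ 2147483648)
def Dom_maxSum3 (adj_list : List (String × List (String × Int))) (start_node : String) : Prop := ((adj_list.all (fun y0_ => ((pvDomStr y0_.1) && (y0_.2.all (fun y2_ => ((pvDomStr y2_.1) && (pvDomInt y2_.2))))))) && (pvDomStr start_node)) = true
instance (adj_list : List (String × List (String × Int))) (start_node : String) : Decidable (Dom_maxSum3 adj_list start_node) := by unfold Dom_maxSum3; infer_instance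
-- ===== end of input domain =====

-- B replaces A's memoized top-down recursion over (node, visited-mask) states by an explicit
-- bottom-up dynamic program over the reachable states (alternative decomposition, similar cost).
-- Note: A's dp cache is pure memoization (value-identical); the port of A computes the same
-- recursion without the cache.  Python visited masks are nonnegative ints; they are ported as Nat
-- (1 << i, |, & agree with Nat's <<<, |||, &&& on nonnegative values).

-- ===== PORT A =====
-- dict-of-dicts argument: Python receives adj_list as a dict whose values are dicts
def pvAdjA (adj_list : List (String × List (String × Int))) : PySem.Dict String (PySem.Dict String Int) :=
  PySem.Dict.ofList (adj_list.map (fun p => (p.1, PySem.Dict.ofList p.2)))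

-- solve(curr_node, visited) with a fuel argument for termination; the dp cache of A is pure
-- memoization and is omitted (identical values).  The `none` branch of node_to_idx.get? is
-- Python's KeyError (excluded by Pre_maxSum3).
def pvSolveA (d : PySem.Dict String (PySem.Dict String Int)) (idx : PySem.Dict String Nat) :
    Nat → String → Nat → Int
  | 0, _, _ => 0
  | f + 1, curr, visited =>
    ((d.getD curr PySem.Dict.empty).items).foldl (fun maxSum p =>
      match idx.get? p.1 with
      | none => maxSum
      | some i =>
        if visited &&& (1 <<< i) == 0 then
          max maxSum (p.2 + pvSolveA d idx f p.1 (visited ||| (1 <<< i)))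
        else maxSum) 0

def maxSum3 (adj_list : List (String × List (String × Int))) (start_node : String) : Int :=
  let d := pvAdjA adj_list
  let nodes := d.keys
  let node_to_idx : PySem.Dict String Nat := PySem.Dict.ofList nodes.zipIdx
  match node_to_idx.get? start_node with
  | none => 0   -- Python: KeyError (excluded by Pre_maxSum3)
  | some i => pvSolveA d node_to_idx nodes.length start_node (1 <<< i)

-- ===== PORT B =====
-- successors(state): unvisited-neighbor states (the `none` branch is Python's KeyError,
-- excluded by Pre_maxSum3)
def pvSuccB (d : PySem.Dict String (PySem.Dict String Int)) (idx : PySem.Dict String Nat)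
    (s : String × Nat) : List (String × Nat) :=
  ((d.getD s.1 PySem.Dict.empty).items).filterMap (fun p =>
    match idx.get? p.1 with
    | none => none
    | some i =>
      if s.2 &&& (1 <<< i) == 0 then some (p.1, s.2 ||| (1 <<< i)) else none)

-- the `for _ in nodes: states |= {...}` expansion loop
def pvExpandB (d : PySem.Dict String (PySem.Dict String Int)) (idx : PySem.Dict String Nat) :
    Nat → PySem.Set (String × Nat) → PySem.Set (String × Nat)
  | 0, st => st
  | k + 1, st => pvExpandB d idx k (PySem.Set.update st (st.flatMap (pvSuccB d idx)))

-- max([0] + [dist + value[child] for ...]); the child lookup is total here (getD 0):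
-- children of a filled state are always filled first, so Python's value[...] never raises
def pvValB (d : PySem.Dict String (PySem.Dict String Int)) (idx : PySem.Dict String Nat)
    (value : PySem.Dict (String × Nat) Int) (s : String × Nat) : Int :=
  match (((0 : Int) :: ((d.getD s.1 PySem.Dict.empty).items).filterMap (fun p =>
    match idx.get? p.1 with
    | none => none
    | some i =>
      if s.2 &&& (1 <<< i) == 0 then
        some (p.2 + value.getD (p.1, s.2 ||| (1 <<< i)) 0)
      else none)).max?) with
  | some v => v
  | none => 0

def pvFillB (d : PySem.Dict String (PySem.Dict String Int)) (idx : PySem.Dict String Nat)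
    (order : List (String × Nat)) : PySem.Dict (String × Nat) Int :=
  order.foldl (fun value s => value.insert s (pvValB d idx value s)) PySem.Dict.empty

def maxSum3_alt (adj_list : List (String × List (String × Int))) (start_node : String) : Int :=
  let d : PySem.Dict String (PySem.Dict String Int) :=
    PySem.Dict.ofList (adj_list.map (fun p => (p.1, PySem.Dict.ofList p.2)))
  let nodes := d.keys
  let idx : PySem.Dict String Nat := PySem.Dict.ofList nodes.zipIdx
  match idx.get? start_node with
  | none => 0   -- Python: KeyError (excluded by Pre_maxSum3)
  | some i0 =>
    let start_state : String × Nat := (start_node, 1 <<< i0)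
    let states := pvExpandB d idx nodes.length (PySem.Set.ofList [start_state])
    -- bin(mask).count("1") on a nonnegative mask is PySem.Int.bitCount
    let order := PySem.List.sorted states (fun s => PySem.Int.bitCount ((s.2 : Nat) : Int)) true
    (pvFillB d idx order).getD start_state 0

-- ===== PRECONDITION & SPEC =====
-- Pre_ requires start_node and every listed neighbour to be keys of adj_list: A raises KeyError
-- when a missing node is reachable from the start, and since reachability is not a closed-form
-- condition Pre_ conservatively also excludes graphs whose only missing neighbours sit in parts
-- never explored from start_node (there A returns and B returns the same value).
def Pre_maxSum3 (adj_list : List (String × List (String × Int))) (start_node : String) : Prop :=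
  start_node ∈ adj_list.map Prod.fst ∧
  ∀ p ∈ adj_list, ∀ q ∈ p.2, q.1 ∈ adj_list.map Prod.fst

instance (adj_list : List (String × List (String × Int))) (start_node : String) :
    Decidable (Pre_maxSum3 adj_list start_node) := by unfold Pre_maxSum3; infer_instance

def pvWitness_maxSum3 : (List (String × List (String × Int))) × String :=
  ([("a", [("b", 3), ("c", -2)]), ("b", [("a", 3)]), ("c", [("b", 7)])], "a")

def Spec_maxSum3 (adj_list : List (String × List (String × Int))) (start_node : String) (out : Int) : Prop := out = maxSum3_alt adj_list start_node
instance (adj_list : List (String × List (String × Int))) (start_node : String) (out : Int) : Decidable (Spec_maxSum3 adj_list start_node out) := by unfold Spec_maxSum3; infer_instance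

-- ===== CLAIM (what is proved, stated in full; the proofs are below) =====
def Claim_equal_maxSum3 : Prop := ∀ (adj_list : List (String × List (String × Int))) (start_node : String), Dom_maxSum3 adj_list start_node → Pre_maxSum3 adj_list start_node → Spec_maxSum3 adj_list start_node (maxSum3 adj_list start_node)

-- ===== LEMMAS AND PROOFS =====

-- popcount of a nonnegative int, in the recursive form bitCount computes
def pvPc : Nat → Nat
  | 0 => 0
  | m + 1 => (m + 1) % 2 + pvPc ((m + 1) / 2)
decreasing_by exact Nat.div_lt_self (Nat.succ_pos m) (by omega)

-- number of unset bits below n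
def pvMu (n m : Nat) : Nat := (List.range n).countP (fun j => !m.testBit j)

lemma pvPc_pos_eq (m : Nat) (h : 0 < m) : pvPc m = m % 2 + pvPc (m / 2) := by
  match m, h with
  | m + 1, _ => simp [pvPc]

lemma pv_bitCount_eq_pvPc (m : Nat) : PySem.Int.bitCount ((m : Nat) : Int) = pvPc m := by
  induction m using Nat.strong_induction_on with
  | _ m ih =>
    rcases Nat.eq_zero_or_pos m with h | h
    · subst h; simp [pvPc, PySem.Int.bitCount_zero]
    · rw [PySem.Int.bitCount_natCast h, ih (m / 2) (Nat.div_lt_self h (by omega)),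
        pvPc_pos_eq m h]

lemma pv_countP_shift (n : Nat) (p : Nat → Bool) :
    (List.range (n + 1)).countP p = (p 0).toNat + (List.range n).countP (fun j => p (j + 1)) := by
  rw [List.range_succ_eq_map, List.countP_cons, List.countP_map]
  have : List.countP (p ∘ Nat.succ) (List.range n)
      = List.countP (fun j => p (j + 1)) (List.range n) := by
    apply List.countP_congr; intro j _; rfl
  rcases Bool.eq_false_or_eq_true (p 0) with h | h
  · simp [h, this]
    omega
  · simp [h, this]

lemma pvPc_add_pvMu (n m : Nat) (h : m < 2 ^ n) : pvPc m + pvMu n m = n := by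
  induction n generalizing m with
  | zero =>
    interval_cases m
    simp [pvPc, pvMu]
  | succ n ih =>
    rcases Nat.eq_zero_or_pos m with h0 | h0
    · subst h0
      simp [pvPc, pvMu, Nat.zero_testBit]
    · have hdiv : m / 2 < 2 ^ n := by
        rw [Nat.div_lt_iff_lt_mul (by omega)]
        calc m < 2 ^ (n + 1) := h
        _ = 2 ^ n * 2 := by ring
      have hmu : pvMu (n + 1) m = (!m.testBit 0).toNat + pvMu n (m / 2) := by
        unfold pvMu
        rw [pv_countP_shift]
        congr 1
        apply List.countP_congr
        intro j _
        simp [Nat.testBit_succ]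
      have hbit : m.testBit 0 = decide (m % 2 = 1) := Nat.testBit_zero m
      have h2 := Nat.mod_two_eq_zero_or_one m
      have := ih (m / 2) hdiv
      rw [hmu, pvPc_pos_eq m h0, hbit]
      rcases h2 with h2 | h2 <;> simp [h2] <;> omega

lemma pv_countP_ne_of_mem {l : List Nat} {i : Nat} (hnd : l.Nodup) (hi : i ∈ l)
    (p q : Nat → Bool) (hpq : ∀ j ∈ l, j ≠ i → p j = q j) (hpi : p i = false) (hqi : q i = true) :
    l.countP p + 1 = l.countP q := by
  induction l with
  | nil => simp at hi
  | cons a l ih =>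
    rcases List.mem_cons.mp hi with rfl | hi'
    · have ha : i ∉ l := (List.nodup_cons.mp hnd).1
      have : l.countP p = l.countP q := by
        apply List.countP_congr
        intro j hj
        rw [hpq j (List.mem_cons_of_mem _ hj) (fun hji => ha (hji ▸ hj))]
      simp [hpi, hqi, this]
    · have hai : a ≠ i := fun h => (List.nodup_cons.mp hnd).1 (h ▸ hi')
      have hpa := hpq a (List.mem_cons_self) hai
      have := ih (List.nodup_cons.mp hnd).2 hi'
        (fun j hj hji => hpq j (List.mem_cons_of_mem _ hj) hji)
      simp only [List.countP_cons, hpa]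
      omega

lemma pvMu_or (n m i : Nat) (hi : i < n) (hb : m.testBit i = false) :
    pvMu n (m ||| 1 <<< i) + 1 = pvMu n m := by
  unfold pvMu
  apply pv_countP_ne_of_mem (List.nodup_range) (List.mem_range.mpr hi)
  · intro j _ hji
    simp [Nat.testBit_or, Nat.shiftLeft_eq, (Ne.symm hji : ¬ i = j)]
  · simp [Nat.testBit_or, Nat.shiftLeft_eq]
  · simp [hb]

lemma pvMu_pos (n m i : Nat) (hi : i < n) (hb : m.testBit i = false) : 0 < pvMu n m := by
  unfold pvMu
  rw [List.countP_pos_iff]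
  exact ⟨i, List.mem_range.mpr hi, by simp [hb]⟩

lemma pvPc_or (n m i : Nat) (hm : m < 2 ^ n) (hi : i < n) (hb : m.testBit i = false) :
    pvPc (m ||| 1 <<< i) = pvPc m + 1 := by
  have h2 : (1 <<< i : Nat) < 2 ^ n := by
    rw [Nat.shiftLeft_eq, Nat.one_mul]
    exact Nat.pow_lt_pow_right (by omega) hi
  have hor : m ||| 1 <<< i < 2 ^ n := Nat.or_lt_two_pow hm h2
  have e1 := pvPc_add_pvMu n m hm
  have e2 := pvPc_add_pvMu n (m ||| 1 <<< i) hor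
  have e3 := pvMu_or n m i hi hb
  omega

lemma pvMu_pow (n i : Nat) (hi : i < n) : pvMu n (1 <<< i) = n - 1 := by
  have h0 : pvMu n 0 = n := by simp [pvMu, Nat.zero_testBit]
  have hb : (0 : Nat).testBit i = false := Nat.zero_testBit i
  have := pvMu_or n 0 i hi hb
  simp only [Nat.zero_or] at this
  omega

lemma pv_band_eq_zero (m i : Nat) : (m &&& (1 <<< i) == 0) = !m.testBit i := by
  rw [Nat.shiftLeft_eq, Nat.one_mul, Nat.and_two_pow]
  rcases Bool.eq_false_or_eq_true (m.testBit i) with h | h <;> simp [h]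

lemma pv_band_true_testBit (m i : Nat) (h : (m &&& (1 <<< i) == 0) = true) :
    m.testBit i = false := by
  have this := pv_band_eq_zero m i
  rw [h] at this
  rcases Bool.eq_false_or_eq_true (m.testBit i) with hb | hb
  · rw [hb] at this; simp at this
  · exact hb

-- generic: fold with "match option with none => acc | some v => max acc v" is foldl max over filterMap
lemma pv_foldl_opt_max {α : Type} (l : List α) (g : α → Option Int) (a : Int) :
    l.foldl (fun acc x => match g x with | none => acc | some v => max acc v) a
      = (l.filterMap g).foldl max a := by
  induction l generalizing a with
  | nil => rfl
  | cons x l ih =>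
    rcases hg : g x with _ | v <;> simp [hg, ih]

lemma pv_max?_cons_foldl (a : Int) (cs : List Int) :
    (match (a :: cs).max? with | some v => v | none => a) = cs.foldl max a := by
  rfl

-- items of an insert-fold originate from the seed dict or from the list
lemma pv_items_foldl_origin {κ ν β : Type} [BEq κ] [LawfulBEq κ] (l : List β) (key : β → κ)
    (f : β → ν) (d : PySem.Dict κ ν) (pr : κ × ν)
    (h : pr ∈ (l.foldl (fun d x => d.insert (key x) (f x)) d).items) :
    pr ∈ d.items ∨ ∃ x ∈ l, pr = (key x, f x) := by
  induction l generalizing d with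
  | nil => exact Or.inl h
  | cons x l ih =>
    rcases ih _ h with h' | ⟨y, hy, rfl⟩
    · rcases (PySem.Dict.mem_items_insert _ _ _ _).mp h' with rfl | ⟨hmem, _⟩
      · exact Or.inr ⟨x, List.mem_cons_self, rfl⟩
      · exact Or.inl hmem
    · exact Or.inr ⟨y, List.mem_cons_of_mem _ hy, rfl⟩

lemma pv_idx_lt (nodes : List String) (k : String) (i : Nat)
    (h : (PySem.Dict.ofList nodes.zipIdx).get? k = some i) : i < nodes.length := by
  have hmem := PySem.Dict.mem_items_of_get?_eq_some _ h
  have : PySem.Dict.ofList nodes.zipIdx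
      = nodes.zipIdx.foldl (fun d x => d.insert x.1 x.2) PySem.Dict.empty := rfl
  rw [this] at hmem
  rcases pv_items_foldl_origin nodes.zipIdx Prod.fst Prod.snd PySem.Dict.empty _ hmem with
    h' | ⟨⟨x, j⟩, hx, hpr⟩
  · simp [PySem.Dict.empty] at h'
  · cases hpr
    have := List.mem_zipIdx hx
    omega

-- fuel does not matter once it exceeds the number of unset bits
lemma pvSolveA_fuel (d : PySem.Dict String (PySem.Dict String Int)) (idx : PySem.Dict String Nat)
    (n : Nat) (Hidx : ∀ k i, idx.get? k = some i → i < n) :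
    ∀ f1 f2 c m, pvMu n m < f1 → pvMu n m < f2 →
      pvSolveA d idx f1 c m = pvSolveA d idx f2 c m := by
  intro f1
  induction f1 with
  | zero => intro f2 c m h1; omega
  | succ f1 ih =>
    intro f2 c m h1 h2
    match f2, h2 with
    | f2 + 1, h2 =>
      simp only [pvSolveA]
      apply PySem.List.foldl_congr_mem
      intro acc p hp
      rcases hgi : idx.get? p.1 with _ | i
      · rfl
      · have hin : i < n := Hidx _ _ hgi
        rcases hbit : (m &&& (1 <<< i) == 0) with _ | _
        · simp [hbit]
        · have htb : m.testBit i = false := pv_band_true_testBit m i hbit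
          have hmu := pvMu_or n m i hin htb
          have hpos := pvMu_pos n m i hin htb
          have hrec : pvSolveA d idx f1 p.1 (m ||| 1 <<< i)
              = pvSolveA d idx f2 p.1 (m ||| 1 <<< i) := by
            apply ih <;> omega
          simp [hbit, hrec]

lemma pv_solve_fold_shape (d : PySem.Dict String (PySem.Dict String Int))
    (idx : PySem.Dict String Nat) (f : Nat) (c : String) (m : Nat) :
    pvSolveA d idx (f + 1) c m =
      (((d.getD c PySem.Dict.empty).items).filterMap (fun p =>
        match idx.get? p.1 with
        | none => none
        | some i =>
          if m &&& (1 <<< i) == 0 then some (p.2 + pvSolveA d idx f p.1 (m ||| (1 <<< i)))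
          else none)).foldl max 0 := by
  simp only [pvSolveA]
  rw [← pv_foldl_opt_max]
  apply PySem.List.foldl_congr_mem
  intro acc p _
  rcases idx.get? p.1 with _ | i
  · rfl
  · rcases hbit : (m &&& (1 <<< i) == 0) with _ | _ <;> simp [hbit]

-- the canonical value of a state
def pvSval (d : PySem.Dict String (PySem.Dict String Int)) (idx : PySem.Dict String Nat)
    (n : Nat) (c : String) (m : Nat) : Int :=
  pvSolveA d idx (pvMu n m + 1) c m

lemma pvSval_eq (d : PySem.Dict String (PySem.Dict String Int)) (idx : PySem.Dict String Nat)
    (n : Nat) (Hidx : ∀ k i, idx.get? k = some i → i < n) (c : String) (m : Nat) :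
    pvSval d idx n c m =
      (((d.getD c PySem.Dict.empty).items).filterMap (fun p =>
        match idx.get? p.1 with
        | none => none
        | some i =>
          if m &&& (1 <<< i) == 0 then some (p.2 + pvSval d idx n p.1 (m ||| (1 <<< i)))
          else none)).foldl max 0 := by
  unfold pvSval
  rw [pv_solve_fold_shape]
  congr 1
  apply List.filterMap_congr
  intro p _
  rcases hgi : idx.get? p.1 with _ | i
  · rfl
  · rcases hbit : (m &&& (1 <<< i) == 0) with _ | _
    · have hc : ¬ (m &&& 1 <<< i = 0) := by simpa using hbit
      simp [hc]
    · have hc : m &&& 1 <<< i = 0 := by simpa using hbit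
      have hin : i < n := Hidx _ _ hgi
      have htb : m.testBit i = false := pv_band_true_testBit m i hbit
      have hmu := pvMu_or n m i hin htb
      have hpos := pvMu_pos n m i hin htb
      have hfu : pvSolveA d idx (pvMu n m) p.1 (m ||| (1 <<< i))
          = pvSolveA d idx (pvMu n (m ||| (1 <<< i)) + 1) p.1 (m ||| (1 <<< i)) := by
        apply pvSolveA_fuel d idx n Hidx <;> omega
      simp [hc, hfu]

-- expansion loop: peel the step at the outside
lemma pvExpandB_succ_out (d : PySem.Dict String (PySem.Dict String Int))
    (idx : PySem.Dict String Nat) (k : Nat) (st : PySem.Set (String × Nat)) :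
    pvExpandB d idx (k + 1) st
      = PySem.Set.update (pvExpandB d idx k st) ((pvExpandB d idx k st).flatMap (pvSuccB d idx)) := by
  induction k generalizing st with
  | zero => rfl
  | succ k ih =>
    show pvExpandB d idx (k + 1) (PySem.Set.update st (st.flatMap (pvSuccB d idx))) = _
    rw [ih]
    rfl

lemma pvExpandB_mem_mono (d : PySem.Dict String (PySem.Dict String Int))
    (idx : PySem.Dict String Nat) (k : Nat) (st : PySem.Set (String × Nat))
    (x : String × Nat) (h : x ∈ st) : x ∈ pvExpandB d idx k st := by
  induction k generalizing st with
  | zero => exact h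
  | succ k ih =>
    exact ih _ ((PySem.Set.mem_update st _ x).mpr (Or.inl h))

lemma pvExpandB_mono_k (d : PySem.Dict String (PySem.Dict String Int))
    (idx : PySem.Dict String Nat) (j k : Nat) (hjk : j ≤ k) (st : PySem.Set (String × Nat))
    (x : String × Nat) (h : x ∈ pvExpandB d idx j st) : x ∈ pvExpandB d idx k st := by
  induction k with
  | zero =>
    have : j = 0 := by omega
    subst this; exact h
  | succ k ih =>
    rcases Nat.lt_or_ge j (k + 1) with hj | hj
    · have := ih (by omega)
      rw [pvExpandB_succ_out]
      exact (PySem.Set.mem_update _ _ x).mpr (Or.inl this)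
    · have : j = k + 1 := by omega
      subst this; exact h

lemma pvExpandB_origin (d : PySem.Dict String (PySem.Dict String Int))
    (idx : PySem.Dict String Nat) (k : Nat) (st : PySem.Set (String × Nat))
    (x : String × Nat) (h : x ∈ pvExpandB d idx k st) :
    x ∈ st ∨ ∃ j < k, ∃ s ∈ pvExpandB d idx j st, x ∈ pvSuccB d idx s := by
  induction k with
  | zero => exact Or.inl h
  | succ k ih =>
    rw [pvExpandB_succ_out] at h
    rcases (PySem.Set.mem_update _ _ x).mp h with h' | h'
    · rcases ih h' with h0 | ⟨j, hj, s, hs, hsucc⟩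
      · exact Or.inl h0
      · exact Or.inr ⟨j, by omega, s, hs, hsucc⟩
    · rcases List.mem_flatMap.mp h' with ⟨s, hs, hsucc⟩
      exact Or.inr ⟨k, by omega, s, hs, hsucc⟩

lemma pvSuccB_inv (d : PySem.Dict String (PySem.Dict String Int)) (idx : PySem.Dict String Nat)
    (s t : String × Nat) (h : t ∈ pvSuccB d idx s) :
    ∃ i, idx.get? t.1 = some i ∧ s.2.testBit i = false ∧ t.2 = s.2 ||| (1 <<< i) := by
  rcases List.mem_filterMap.mp h with ⟨p, _, heq⟩
  rcases hgi : idx.get? p.1 with _ | i <;> rw [hgi] at heq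
  · simp at heq
  · rcases hbit : (s.2 &&& (1 <<< i) == 0) with _ | _
    · simp [hbit] at heq
    · simp only [hbit, if_true] at heq
      cases heq
      exact ⟨i, hgi, pv_band_true_testBit _ _ hbit, rfl⟩

-- staging: every discovered state already appears after (popcount - 1) rounds
lemma pvStage (d : PySem.Dict String (PySem.Dict String Int)) (idx : PySem.Dict String Nat)
    (n : Nat) (Hidx : ∀ k i, idx.get? k = some i → i < n) (s0 : PySem.Set (String × Nat))
    (H0 : ∀ x ∈ s0, x.2 < 2 ^ n ∧ pvPc x.2 = 1) :
    ∀ k x, x ∈ pvExpandB d idx k s0 →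
      x.2 < 2 ^ n ∧ 1 ≤ pvPc x.2 ∧ x ∈ pvExpandB d idx (pvPc x.2 - 1) s0 := by
  intro k
  induction k using Nat.strong_induction_on with
  | _ k ih =>
    intro x hx
    rcases pvExpandB_origin d idx k s0 x hx with hx0 | ⟨j, hj, s, hs, hsucc⟩
    · have h0 := H0 x hx0
      refine ⟨h0.1, by omega, ?_⟩
      rw [h0.2]
      exact hx0
    · obtain ⟨hlt, hpc1, hstage⟩ := ih j hj s hs
      obtain ⟨i, hgi, htb, ht2⟩ := pvSuccB_inv d idx s x hsucc
      have hin : i < n := Hidx _ _ hgi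
      have hpow : (1 <<< i : Nat) < 2 ^ n := by
        rw [Nat.shiftLeft_eq, Nat.one_mul]
        exact Nat.pow_lt_pow_right (by omega) hin
      have hx2 : x.2 < 2 ^ n := by rw [ht2]; exact Nat.or_lt_two_pow hlt hpow
      have hpc : pvPc x.2 = pvPc s.2 + 1 := by rw [ht2]; exact pvPc_or n s.2 i hlt hin htb
      refine ⟨hx2, by omega, ?_⟩
      have hmem : x ∈ PySem.Set.update (pvExpandB d idx (pvPc s.2 - 1) s0)
          ((pvExpandB d idx (pvPc s.2 - 1) s0).flatMap (pvSuccB d idx)) :=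
        (PySem.Set.mem_update _ _ x).mpr (Or.inr (List.mem_flatMap.mpr ⟨s, hstage, hsucc⟩))
      rw [← pvExpandB_succ_out] at hmem
      have : pvPc s.2 - 1 + 1 = pvPc x.2 - 1 := by omega
      rwa [this] at hmem

lemma pvClosed (d : PySem.Dict String (PySem.Dict String Int)) (idx : PySem.Dict String Nat)
    (n : Nat) (Hidx : ∀ k i, idx.get? k = some i → i < n) (s0 : PySem.Set (String × Nat))
    (H0 : ∀ x ∈ s0, x.2 < 2 ^ n ∧ pvPc x.2 = 1) (x t : String × Nat)
    (hx : x ∈ pvExpandB d idx n s0) (ht : t ∈ pvSuccB d idx x) :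
    t ∈ pvExpandB d idx n s0 := by
  obtain ⟨hlt, hpc1, hstage⟩ := pvStage d idx n Hidx s0 H0 n x hx
  obtain ⟨i, hgi, htb, _⟩ := pvSuccB_inv d idx x t ht
  have hin : i < n := Hidx _ _ hgi
  have hmupos := pvMu_pos n x.2 i hin htb
  have hsum := pvPc_add_pvMu n x.2 hlt
  have hmem : t ∈ PySem.Set.update (pvExpandB d idx (pvPc x.2 - 1) s0)
      ((pvExpandB d idx (pvPc x.2 - 1) s0).flatMap (pvSuccB d idx)) :=
    (PySem.Set.mem_update _ _ t).mpr (Or.inr (List.mem_flatMap.mpr ⟨x, hstage, ht⟩))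
  rw [← pvExpandB_succ_out] at hmem
  exact pvExpandB_mono_k d idx (pvPc x.2 - 1 + 1) n (by omega) s0 t hmem

lemma pvValB_eq_sval (d : PySem.Dict String (PySem.Dict String Int)) (idx : PySem.Dict String Nat)
    (n : Nat) (Hidx : ∀ k i, idx.get? k = some i → i < n)
    (value : PySem.Dict (String × Nat) Int) (s : String × Nat)
    (Hchild : ∀ t ∈ pvSuccB d idx s, value.getD t 0 = pvSval d idx n t.1 t.2) :
    pvValB d idx value s = pvSval d idx n s.1 s.2 := by
  have h0 : pvValB d idx value s =
      (((d.getD s.1 PySem.Dict.empty).items).filterMap (fun p =>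
        match idx.get? p.1 with
        | none => none
        | some i =>
          if s.2 &&& (1 <<< i) == 0 then
            some (p.2 + value.getD (p.1, s.2 ||| (1 <<< i)) 0)
          else none)).foldl max 0 :=
    pv_max?_cons_foldl 0 _
  rw [h0, pvSval_eq d idx n Hidx]
  congr 1
  apply List.filterMap_congr
  intro p hp
  rcases hgi : idx.get? p.1 with _ | i
  · rfl
  · rcases hbit : (s.2 &&& (1 <<< i) == 0) with _ | _
    · simp [hbit]
    · have hchild : (p.1, s.2 ||| (1 <<< i)) ∈ pvSuccB d idx s :=
        List.mem_filterMap.mpr ⟨p, hp, by rw [hgi]; simp [hbit]⟩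
      have hv := Hchild _ hchild
      simp [hbit, hv]

lemma pvFill_go (d : PySem.Dict String (PySem.Dict String Int)) (idx : PySem.Dict String Nat)
    (n : Nat) (Hidx : ∀ k i, idx.get? k = some i → i < n) (states : List (String × Nat))
    (Hclosed : ∀ s ∈ states, ∀ t ∈ pvSuccB d idx s, t ∈ states)
    (Hpc : ∀ s ∈ states, ∀ t ∈ pvSuccB d idx s, pvPc s.2 < pvPc t.2) :
    ∀ (l : List (String × Nat)) (value : PySem.Dict (String × Nat) Int),
      (∀ s ∈ l, s ∈ states) →
      l.Pairwise (fun a b => pvPc b.2 ≤ pvPc a.2) →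
      (∀ t ∈ states, t ∉ l → value.getD t 0 = pvSval d idx n t.1 t.2) →
      ∀ t ∈ states,
        (l.foldl (fun v s => v.insert s (pvValB d idx v s)) value).getD t 0
          = pvSval d idx n t.1 t.2 := by
  intro l
  induction l with
  | nil =>
    intro value _ _ Hv t ht
    exact Hv t ht (List.not_mem_nil)
  | cons s l ih =>
    intro value Hsub Hpair Hv t ht
    simp only [List.foldl_cons]
    have hs : s ∈ states := Hsub s List.mem_cons_self
    have hval : pvValB d idx value s = pvSval d idx n s.1 s.2 := by
      apply pvValB_eq_sval d idx n Hidx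
      intro t' ht'
      have ht's : t' ∈ states := Hclosed s hs t' ht'
      have hpc := Hpc s hs t' ht'
      refine Hv t' ht's ?_
      intro hmem
      rcases List.mem_cons.mp hmem with rfl | hmem'
      · omega
      · have := (List.pairwise_cons.mp Hpair).1 t' hmem'
        omega
    apply ih
    · intro s' hs'; exact Hsub s' (List.mem_cons_of_mem _ hs')
    · exact (List.pairwise_cons.mp Hpair).2
    · intro t' ht' hnl
      rw [PySem.Dict.getD_insert]
      by_cases he : t' = s
      · subst he; simp [hval]
      · rw [if_neg he]
        exact Hv t' ht' (fun hm => (List.mem_cons.mp hm).elim he hnl)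
    · exact ht

theorem pv_main (adj_list : List (String × List (String × Int))) (start_node : String) :
    maxSum3 adj_list start_node = maxSum3_alt adj_list start_node := by
  have hd : PySem.Dict.ofList (adj_list.map (fun p => (p.1, PySem.Dict.ofList p.2)))
      = pvAdjA adj_list := rfl
  simp only [maxSum3, maxSum3_alt, hd]
  rcases hg : (PySem.Dict.ofList (pvAdjA adj_list).keys.zipIdx).get? start_node with _ | i0
  · rfl
  · dsimp only
    have Hidx : ∀ k i, (PySem.Dict.ofList (pvAdjA adj_list).keys.zipIdx).get? k = some i →
        i < (pvAdjA adj_list).keys.length := fun k i h => pv_idx_lt _ k i h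
    have hi0 := pv_idx_lt _ _ _ hg
    set d := pvAdjA adj_list with hdd
    set nodes := d.keys with hnodes
    set idx := (PySem.Dict.ofList nodes.zipIdx) with hidx
    set n := nodes.length with hn
    have hpow : (1 <<< i0 : Nat) < 2 ^ n := by
      rw [Nat.shiftLeft_eq, Nat.one_mul]
      exact Nat.pow_lt_pow_right (by omega) hi0
    have hmu := pvMu_pow n i0 hi0
    have hpc1 : pvPc (1 <<< i0) = 1 := by
      have := pvPc_add_pvMu n (1 <<< i0) hpow
      omega
    -- left side is the canonical value
    have hL : pvSolveA d idx n start_node (1 <<< i0)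
        = pvSval d idx n start_node (1 <<< i0) := by
      unfold pvSval
      apply pvSolveA_fuel d idx n Hidx <;> omega
    rw [hL]
    -- right side
    set st0 : PySem.Set (String × Nat) := PySem.Set.ofList [(start_node, 1 <<< i0)] with hst0
    have H0 : ∀ x ∈ st0, x.2 < 2 ^ n ∧ pvPc x.2 = 1 := by
      intro x hx
      have hx1 : x = (start_node, 1 <<< i0) := by
        have h1 := (PySem.Set.mem_ofList _ x).mp hx
        simpa using h1
      subst hx1
      exact ⟨hpow, hpc1⟩
    set states := pvExpandB d idx n st0 with hstates
    have Hclosed : ∀ s ∈ states, ∀ t ∈ pvSuccB d idx s, t ∈ states :=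
      fun s hs t ht => pvClosed d idx n Hidx st0 H0 s t hs ht
    have Hpc : ∀ s ∈ states, ∀ t ∈ pvSuccB d idx s, pvPc s.2 < pvPc t.2 := by
      intro s hs t ht
      obtain ⟨hlt, _, _⟩ := pvStage d idx n Hidx st0 H0 n s hs
      obtain ⟨i, hgi, htb, ht2⟩ := pvSuccB_inv d idx s t ht
      have := pvPc_or n s.2 i hlt (Hidx _ _ hgi) htb
      rw [ht2, this]
      omega
    set order := PySem.List.sorted states (fun s => PySem.Int.bitCount ((s.2 : Nat) : Int)) true
      with horder
    have Hsub : ∀ s ∈ order, s ∈ states := by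
      intro s hs
      exact (PySem.List.mem_sorted states _ true s).mp hs
    have Hpair : order.Pairwise (fun a b => pvPc b.2 ≤ pvPc a.2) := by
      have := PySem.List.sorted_pairwise_rev states
        (fun s : String × Nat => PySem.Int.bitCount ((s.2 : Nat) : Int))
      apply this.imp
      intro a b h
      simpa [pv_bitCount_eq_pvPc] using h
    have Hv0 : ∀ t ∈ states, t ∉ order → PySem.Dict.empty.getD t 0 = pvSval d idx n t.1 t.2 := by
      intro t ht hnot
      exact absurd ((PySem.List.mem_sorted states _ true t).mpr ht) hnot
    have hstart : (start_node, 1 <<< i0) ∈ states :=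
      pvExpandB_mem_mono d idx n st0 _ ((PySem.Set.mem_ofList _ _).mpr List.mem_cons_self)
    have hfill := pvFill_go d idx n Hidx states Hclosed Hpc order PySem.Dict.empty
      Hsub Hpair Hv0 (start_node, 1 <<< i0) hstart
    unfold pvFillB
    exact hfill.symm

-- ===== VERDICT (by name: the statement is the Claim_ definition above) =====
theorem maxSum3_spec : Claim_equal_maxSum3 := by
  intro adj_list start_node _ _
  unfold Spec_maxSum3
  exact pv_main adj_list start_node
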